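-- pv_equiv track=rewrite | github.com/rubengrootroessink/AdventOfCode | 2020/5/2.py | binary_split
-- ===== SOURCE A (Python) =====
-- def binary_split(item_string, max):
--     seat_nums = list(range(0, max + 1))
--     for char in item_string:
--         if char in 'FL':
--             seat_nums = seat_nums[:len(seat_nums)//2]
--         elif char in 'BR':
--             seat_nums = seat_nums[len(seat_nums)//2:]
--     return seat_nums[0]
-- ===== SOURCE B (Python) =====
-- def binary_split(item_string, max):
--     lo = 0
--     n = max + 1
--     for char in item_string:
--         if char in 'FL':
--             n //= 2
--         elif char in 'BR':
--             half = n // 2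
--             lo += half
--             n -= half
--     return lo
-- ===== Notes on version B (the rewrite author's own statement) =====
-- stated objective: simpler
-- what changed: B tracks the current seat interval as two integers (lower bound, width) updated arithmetically per character, instead of materialising and repeatedly slicing a list of all max+1 seat numbers.
import Mathlib
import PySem

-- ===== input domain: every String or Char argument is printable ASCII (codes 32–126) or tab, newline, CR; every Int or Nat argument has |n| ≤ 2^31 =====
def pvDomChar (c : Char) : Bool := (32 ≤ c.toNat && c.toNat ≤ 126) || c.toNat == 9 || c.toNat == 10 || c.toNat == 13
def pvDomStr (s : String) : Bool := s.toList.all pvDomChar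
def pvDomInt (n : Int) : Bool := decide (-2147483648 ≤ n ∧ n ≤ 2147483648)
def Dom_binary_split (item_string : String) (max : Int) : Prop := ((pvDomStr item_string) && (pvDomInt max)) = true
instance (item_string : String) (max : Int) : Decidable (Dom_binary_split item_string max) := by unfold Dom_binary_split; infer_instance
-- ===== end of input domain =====

-- B replaces A's repeatedly sliced list of all max+1 seat numbers by two integers (interval lower bound, width): simpler, no list is built.
-- ===== PORT A =====
-- 'char in "FL"' for the single character produced by iterating a string is exactly char = 'F' ∨ char = 'L'.
def binary_split (item_string : String) (max : Int) : Int :=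
  let seat_nums : List Int := PySem.List.pyRange 0 (max + 1) 1
  let seat_nums := item_string.toList.foldl
    (fun (seat_nums : List Int) (char : Char) =>
      if char = 'F' ∨ char = 'L' then
        PySem.List.slice seat_nums none (some (PySem.Int.floordiv (PySem.List.len seat_nums) 2))
      else if char = 'B' ∨ char = 'R' then
        PySem.List.slice seat_nums (some (PySem.Int.floordiv (PySem.List.len seat_nums) 2)) none
      else seat_nums)
    seat_nums
  PySem.List.pyGetD seat_nums 0 0  -- seat_nums[0]; Pre_ excludes the empty list (IndexError)

-- ===== PORT B =====
def binary_split_alt (item_string : String) (max : Int) : Int :=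
  (item_string.toList.foldl
    (fun (st : Int × Int) (char : Char) =>
      if char = 'F' ∨ char = 'L' then (st.1, PySem.Int.floordiv st.2 2)
      else if char = 'B' ∨ char = 'R' then
        (st.1 + PySem.Int.floordiv st.2 2, st.2 - PySem.Int.floordiv st.2 2)
      else st)
    (0, max + 1)).1

-- ===== PRECONDITION & SPEC =====
-- pvCode cs = (B, 2^k): the FLBR characters of cs read as a little-endian binary numeral (F/L=0, B/R=1),
-- and 2^(number of FLBR characters); other characters are ignored (as A ignores them).
def pvCode : List Char → Int × Int
  | [] => (0, 1)
  | c :: rest =>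
    if c = 'F' ∨ c = 'L' then (2 * (pvCode rest).1, 2 * (pvCode rest).2)
    else if c = 'B' ∨ c = 'R' then (1 + 2 * (pvCode rest).1, 2 * (pvCode rest).2)
    else pvCode rest

-- Exactly the inputs on which A returns: the final seat list is nonempty iff 2^k ≤ max+1+B.
def Pre_binary_split (item_string : String) (max : Int) : Prop :=
  (pvCode item_string.toList).2 ≤ max + 1 + (pvCode item_string.toList).1
instance (item_string : String) (max : Int) : Decidable (Pre_binary_split item_string max) := by
  unfold Pre_binary_split; infer_instance

def pvWitness_binary_split : String × Int := ("FBLR", 15)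

def Spec_binary_split (item_string : String) (max : Int) (out : Int) : Prop :=
  out = binary_split_alt item_string max
instance (item_string : String) (max : Int) (out : Int) : Decidable (Spec_binary_split item_string max out) := by
  unfold Spec_binary_split; infer_instance

-- ===== CLAIM (what is proved, stated in full; the proofs are below) =====
def Claim_equal_binary_split : Prop := ∀ (item_string : String) (max : Int), Dom_binary_split item_string max → Pre_binary_split item_string max → Spec_binary_split item_string max (binary_split item_string max)

-- ===== LEMMAS AND PROOFS =====

-- the two fold step functions, named (used only by the proofs; definitionally the ports' lambdas)
def pvStepA : List Int → Char → List Int := fun seat_nums char =>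
  if char = 'F' ∨ char = 'L' then
    PySem.List.slice seat_nums none (some (PySem.Int.floordiv (PySem.List.len seat_nums) 2))
  else if char = 'B' ∨ char = 'R' then
    PySem.List.slice seat_nums (some (PySem.Int.floordiv (PySem.List.len seat_nums) 2)) none
  else seat_nums

def pvStepB : Int × Int → Char → Int × Int := fun st char =>
  if char = 'F' ∨ char = 'L' then (st.1, PySem.Int.floordiv st.2 2)
  else if char = 'B' ∨ char = 'R' then
    (st.1 + PySem.Int.floordiv st.2 2, st.2 - PySem.Int.floordiv st.2 2)
  else st

lemma pvCode_bounds (cs : List Char) :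
    0 < (pvCode cs).2 ∧ 0 ≤ (pvCode cs).1 ∧ (pvCode cs).1 < (pvCode cs).2 := by
  induction cs with
  | nil => simp [pvCode]
  | cons c rest ih =>
    obtain ⟨h1, h2, h3⟩ := ih
    simp only [pvCode]
    split_ifs <;> omega

lemma pv_fdiv_add (a c : Int) :
    PySem.Int.floordiv a 2 + c = PySem.Int.floordiv (a + 2 * c) 2 := by
  rw [PySem.Int.floordiv_eq_ediv_of_pos (by omega), PySem.Int.floordiv_eq_ediv_of_pos (by omega)]
  omega

lemma pv_fdiv_fdiv (a p : Int) (hp : 0 < p) :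
    PySem.Int.floordiv (PySem.Int.floordiv a 2) p = PySem.Int.floordiv a (2 * p) := by
  rw [PySem.Int.floordiv_eq_ediv_of_pos (by omega : (0:Int) < 2),
      PySem.Int.floordiv_eq_ediv_of_pos hp,
      PySem.Int.floordiv_eq_ediv_of_pos (by omega : (0:Int) < 2 * p)]
  exact Int.ediv_ediv_of_nonneg (by omega)

lemma pv_ceil2 (n : Int) :
    n - PySem.Int.floordiv n 2 = PySem.Int.floordiv (n + 1) 2 := by
  rw [PySem.Int.floordiv_eq_ediv_of_pos (by omega), PySem.Int.floordiv_eq_ediv_of_pos (by omega)]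
  omega

-- the width component of B's fold has the closed form floor((n + B)/2^k)
lemma pvStepB_snd (cs : List Char) : ∀ (lo n : Int),
    (cs.foldl pvStepB (lo, n)).2
      = PySem.Int.floordiv (n + (pvCode cs).1) (pvCode cs).2 := by
  induction cs with
  | nil =>
    intro lo n
    rw [List.foldl_nil]
    simp only [pvCode]
    rw [PySem.Int.floordiv_eq_ediv_of_pos (by omega)]
    omega
  | cons c rest ih =>
    intro lo n
    have hp := (pvCode_bounds rest).1
    simp only [List.foldl_cons, pvStepB, pvCode]
    split_ifs with h1 h2 <;> (try dsimp only)
    · -- F/L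
      rw [ih, pv_fdiv_add, pv_fdiv_fdiv _ _ hp]
    · -- B/R
      rw [ih, pv_ceil2, pv_fdiv_add, pv_fdiv_fdiv _ _ hp]
      congr 1
      ring
    · exact ih lo n

lemma pv_fdiv2_bounds (n : Int) (hn : 0 ≤ n) :
    0 ≤ PySem.Int.floordiv n 2 ∧ PySem.Int.floordiv n 2 ≤ n := by
  rw [PySem.Int.floordiv_eq_ediv_of_pos (by omega)]
  omega

lemma pv_len_pyRange (lo n : Int) (hn : 0 ≤ n) :
    PySem.List.len (PySem.List.pyRange lo (lo + n) 1) = n := by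
  simp [PySem.List.len_eq, PySem.List.length_pyRange_one]
  omega

lemma pv_take_pyRange (lo n k : Int) (hk : 0 ≤ k) (hkn : k ≤ n) :
    (PySem.List.pyRange lo (lo + n) 1).take k.toNat = PySem.List.pyRange lo (lo + k) 1 := by
  rw [PySem.List.pyRange_one_append lo (lo + k) (lo + n) (by omega) (by omega)]
  rw [List.take_left' (by rw [PySem.List.length_pyRange_one]; congr 1; omega)]

lemma pv_drop_pyRange (lo n k : Int) (hk : 0 ≤ k) :
    (PySem.List.pyRange lo (lo + n) 1).drop k.toNat = PySem.List.pyRange (lo + k) (lo + n) 1 := by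
  rcases le_or_gt k n with hkn | hkn
  · rw [PySem.List.pyRange_one_append lo (lo + k) (lo + n) (by omega) (by omega)]
    rw [List.drop_left' (by rw [PySem.List.length_pyRange_one]; congr 1; omega)]
  · rw [PySem.List.pyRange_one_eq_nil (by omega : lo + n ≤ lo + k)]
    apply List.drop_eq_nil_of_le
    rw [PySem.List.length_pyRange_one]
    omega

-- main invariant: A's list is always the contiguous range described by B's (lo, n) state
lemma pv_invariant (cs : List Char) : ∀ (lo n : Int), 0 ≤ n →
    cs.foldl pvStepA (PySem.List.pyRange lo (lo + n) 1)
      = PySem.List.pyRange (cs.foldl pvStepB (lo, n)).1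
          ((cs.foldl pvStepB (lo, n)).1 + (cs.foldl pvStepB (lo, n)).2) 1 := by
  induction cs with
  | nil => intro lo n _; rfl
  | cons c rest ih =>
    intro lo n hn
    have hh := pv_fdiv2_bounds n hn
    simp only [List.foldl_cons, pvStepA, pvStepB]
    split_ifs with h1 h2
    · -- F/L : keep the lower half
      rw [pv_len_pyRange lo n hn,
          PySem.List.slice_to _ (by omega),
          pv_take_pyRange lo n _ (by omega) (by omega)]
      exact ih lo (PySem.Int.floordiv n 2) (by omega)
    · -- B/R : keep the upper half
      rw [pv_len_pyRange lo n hn,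
          PySem.List.slice_from _ (by omega),
          pv_drop_pyRange lo n _ (by omega)]
      have h := ih (lo + PySem.Int.floordiv n 2) (n - PySem.Int.floordiv n 2) (by omega)
      rw [show lo + n = (lo + PySem.Int.floordiv n 2) + (n - PySem.Int.floordiv n 2) by ring]
      exact h
    · exact ih lo n hn

-- ===== VERDICT (by name: the statement is the Claim_ definition above) =====
theorem binary_split_spec : Claim_equal_binary_split := by
  intro s max _ hpre
  unfold Spec_binary_split
  unfold Pre_binary_split at hpre
  have hb := pvCode_bounds s.toList
  have hn0 : (0:Int) ≤ max + 1 := by omega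
  have hA : binary_split s max
      = PySem.List.pyGetD (s.toList.foldl pvStepA (PySem.List.pyRange 0 (max + 1) 1)) 0 0 := rfl
  have hB : binary_split_alt s max = (s.toList.foldl pvStepB (0, max + 1)).1 := rfl
  have hinv := pv_invariant s.toList 0 (max + 1) hn0
  rw [zero_add] at hinv
  have hsnd := pvStepB_snd s.toList 0 (max + 1)
  have hpos : 0 < (s.toList.foldl pvStepB (0, max + 1)).2 := by
    rw [hsnd]
    have h1 := (PySem.Int.le_floordiv_iff_mul_le (a := max + 1 + (pvCode s.toList).1) (q := 1) hb.1).mpr (by omega)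
    omega
  rw [hA, hB, hinv, PySem.List.pyRange_one_cons (by omega), PySem.List.pyGetD_zero_cons]
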